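-- pv_equiv track=rewrite | github.com/Cubaster/SBH-with-ranges | utilities.py | customDistance
-- ===== SOURCE A (Python) =====
-- def customDistance(oligo1: str, oligo2: str):
--     """
--     return index no. at which oligo1 substring is identical with oligo2 substring - further interpreted as weight
--     strings has to be equal in length
--
--     :param oligo1: first oligonucleotide
--     :param oligo2: second oligonucleotide
--     :return: weight of similarity - the bigger weight the smaller similarity
--     """
--     #
--
--     rowSize = len(oligo1)
--     columnSize = len(oligo2)
--     if rowSize != columnSize:
--         return None
--
--     for i in range(1, rowSize):
--         if oligo1[i:rowSize] == oligo2[0: rowSize - i]: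
--             return i
--     return rowSize
-- ===== SOURCE B (Python) =====
-- def customDistance(oligo1: str, oligo2: str):
--     # Single left-to-right pass over positions, maintaining the set of still-viable
--     # shifts (naive multi-candidate matching with incremental elimination) instead of
--     # re-comparing a full slice for every shift.
--     n = len(oligo1)
--     if n != len(oligo2):
--         return None
--     alive = []  # shifts i (ascending) with oligo1[i:j+1-?] consistent so far
--     for j in range(n):
--         alive = [i for i in alive if oligo1[j] == oligo2[j - i]]
--         if j >= 1 and oligo1[j] == oligo2[0]:
--             alive.append(j)
--     return alive[0] if alive else n
-- ===== Notes on version B (the rewrite author's own statement) =====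
-- stated objective: faster
-- what changed: B replaces A's per-shift full-slice comparisons with a single left-to-right pass over character positions that incrementally eliminates candidate shifts (each shift is dropped at its first mismatching character) and returns the smallest survivor.
import Mathlib
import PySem

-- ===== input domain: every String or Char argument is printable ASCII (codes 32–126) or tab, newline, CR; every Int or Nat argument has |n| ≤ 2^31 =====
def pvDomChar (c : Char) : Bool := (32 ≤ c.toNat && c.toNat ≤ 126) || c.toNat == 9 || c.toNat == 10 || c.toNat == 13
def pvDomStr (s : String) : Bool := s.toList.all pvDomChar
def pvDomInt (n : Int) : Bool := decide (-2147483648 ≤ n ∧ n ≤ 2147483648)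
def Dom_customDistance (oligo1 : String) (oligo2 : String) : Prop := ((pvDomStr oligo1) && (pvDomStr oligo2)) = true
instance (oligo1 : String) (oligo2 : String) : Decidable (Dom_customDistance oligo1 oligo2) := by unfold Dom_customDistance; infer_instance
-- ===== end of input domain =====

-- B: one pass over positions eliminating candidate shifts at their first mismatch, instead of A's per-shift full-slice comparisons (measured faster; same worst case).


-- ===== PORT A =====
-- the 'for i in range(1, rowSize)' loop with its early return
def aLoop (oligo1 : String) (oligo2 : String) (rowSize : Int) : List Int → Option Int
  | [] => some rowSize
  | i :: rest =>
    if PySem.Str.slice oligo1 (some i) (some rowSize) == PySem.Str.slice oligo2 (some 0) (some (rowSize - i)) then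
      some i
    else aLoop oligo1 oligo2 rowSize rest

def customDistance (oligo1 : String) (oligo2 : String) : Option Int :=
  let rowSize := PySem.Str.len oligo1
  let columnSize := PySem.Str.len oligo2
  if rowSize ≠ columnSize then none
  else aLoop oligo1 oligo2 rowSize (PySem.List.pyRange 1 rowSize 1)

-- ===== PORT B =====
-- one iteration of B's position loop: filter the alive shifts at position j, then admit shift j
def bStep (oligo1 : String) (oligo2 : String) (alive : List Int) (j : Int) : List Int :=
  let alive' := alive.filter (fun i => PySem.Str.pyGet? oligo1 j == PySem.Str.pyGet? oligo2 (j - i))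
  if 1 ≤ j ∧ (PySem.Str.pyGet? oligo1 j == PySem.Str.pyGet? oligo2 0) = true then alive' ++ [j]
  else alive'

def customDistance_alt (oligo1 : String) (oligo2 : String) : Option Int :=
  let n := PySem.Str.len oligo1
  if n ≠ PySem.Str.len oligo2 then none
  else
    let alive := (PySem.List.pyRange 0 n 1).foldl (bStep oligo1 oligo2) []
    match alive with
    | [] => some n
    | i :: _ => some i

-- ===== PRECONDITION & SPEC =====
def Spec_customDistance (oligo1 : String) (oligo2 : String) (out : Option Int) : Prop := out = customDistance_alt oligo1 oligo2
instance (oligo1 : String) (oligo2 : String) (out : Option Int) : Decidable (Spec_customDistance oligo1 oligo2 out) := by unfold Spec_customDistance; infer_instance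

-- ===== CLAIM (what is proved, stated in full; the proofs are below) =====
def Claim_equal_customDistance : Prop := ∀ (oligo1 : String) (oligo2 : String), Dom_customDistance oligo1 oligo2 → Spec_customDistance oligo1 oligo2 (customDistance oligo1 oligo2)

-- ===== LEMMAS AND PROOFS =====

-- shift i is consistent on positions [i, j)
def chGood (l1 l2 : List Char) (i j : Nat) : Bool := decide (∀ t, i ≤ t → t < j → l1[t]? = l2[t - i]?)

theorem find?_congr' {α : Type} (p q : α → Bool) (l : List α) (h : ∀ a ∈ l, p a = q a) :
    l.find? p = l.find? q := by
  induction l with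
  | nil => rfl
  | cons a l ih =>
    simp only [List.find?_cons]
    rw [h a (List.mem_cons_self)]
    cases q a
    · exact ih (fun b hb => h b (List.mem_cons_of_mem _ hb))
    · rfl

theorem chGood_succ (l1 l2 : List Char) (i j : Nat) (hij : i ≤ j) :
    chGood l1 l2 i (j + 1) = (chGood l1 l2 i j && (l1[j]? == l2[j - i]?)) := by
  rw [Bool.eq_iff_iff]
  simp only [chGood, Bool.and_eq_true, decide_eq_true_eq, beq_iff_eq]
  constructor
  · intro h
    exact ⟨fun t ht1 ht2 => h t ht1 (by omega), h j hij (by omega)⟩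
  · rintro ⟨h1, h2⟩ t ht1 ht2
    rcases Nat.lt_or_ge t j with ht | ht
    · exact h1 t ht1 ht
    · have : t = j := by omega
      subst this; exact h2

theorem chGood_self (l1 l2 : List Char) (j : Nat) :
    chGood l1 l2 j (j + 1) = (l1[j]? == l2[0]?) := by
  rw [Bool.eq_iff_iff]
  simp only [chGood, decide_eq_true_eq, beq_iff_eq]
  constructor
  · intro h
    have := h j le_rfl (by omega)
    simpa using this
  · intro h t ht1 ht2
    have : t = j := by omega
    subst this; simpa using h

-- B's fold over positions 0..j-1 leaves exactly the shifts in [1, j-1] consistent on [i, j)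
theorem bInv (oligo1 oligo2 : String) (j : Nat) :
    (PySem.List.pyRange 0 (j : Int) 1).foldl (bStep oligo1 oligo2) [] =
      ((List.range' 1 (j - 1)).filter
        (fun i => chGood oligo1.toList oligo2.toList i j)).map (fun i : Nat => (i : Int)) := by
  induction j with
  | zero => simp [PySem.List.pyRange_one_eq_nil]
  | succ j ih =>
    have hsplit : PySem.List.pyRange 0 ((j : Int) + 1) 1 =
        PySem.List.pyRange 0 (j : Int) 1 ++ [(j : Int)] := by
      simpa using PySem.List.pyRange_one_succ_right (a := 0) (b := (j : Int)) (by positivity)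
    have hcast : ((j : Int) + 1) = (((j + 1 : Nat)) : Int) := by push_cast; ring
    rw [← hcast, hsplit, List.foldl_append, ih]
    simp only [List.foldl_cons, List.foldl_nil, bStep]
    rw [List.filter_map, List.filter_filter]
    have hgf : ∀ i ∈ List.range' 1 (j - 1),
        (((fun i : Int => PySem.Str.pyGet? oligo1 (j : Int) == PySem.Str.pyGet? oligo2 ((j : Int) - i)) ∘
            (fun i : Nat => (i : Int))) i &&
          chGood oligo1.toList oligo2.toList i j)
          = chGood oligo1.toList oligo2.toList i (j + 1) := by
      intro i hi
      have hmem := List.mem_range'_1.mp hi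
      have hij : i ≤ j := by omega
      have hc : ((j : Int) - (i : Int)) = (((j - i : Nat)) : Int) := by push_cast [hij]; ring
      rw [chGood_succ _ _ _ _ hij, Bool.and_comm]
      simp [hc]
    rw [List.filter_congr hgf]
    by_cases hj : 1 ≤ j
    · have hrange : List.range' 1 (j + 1 - 1) = List.range' 1 (j - 1) ++ [j] := by
        have h1 : j + 1 - 1 = (j - 1) + 1 := by omega
        rw [h1, List.range'_concat]
        congr 1
        simp; omega
      rw [hrange, List.filter_append, List.map_append]
      have hcond : (1 ≤ (j : Int) ∧ (PySem.Str.pyGet? oligo1 (j : Int) == PySem.Str.pyGet? oligo2 0) = true)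
          ↔ (oligo1.toList[j]? == oligo2.toList[0]?) = true := by
        constructor
        · rintro ⟨-, h⟩; simpa [PySem.List.pyGet?_zero] using h
        · intro h
          refine ⟨by exact_mod_cast hj, ?_⟩
          simpa [PySem.List.pyGet?_zero] using h
      by_cases hm : (oligo1.toList[j]? == oligo2.toList[0]?) = true
      · rw [if_pos (hcond.mpr hm)]
        congr 1
        rw [List.filter_singleton, chGood_self, hm]
        rfl
      · have hnc : ¬ (1 ≤ (j : Int) ∧ (PySem.Str.pyGet? oligo1 (j : Int) == PySem.Str.pyGet? oligo2 0) = true) :=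
          fun hc => hm (hcond.mp hc)
        rw [if_neg hnc, List.filter_singleton, chGood_self]
        rw [Bool.not_eq_true] at hm
        rw [hm]
        simp
    · -- j = 0
      have hj0 : j = 0 := by omega
      subst hj0
      norm_num

-- A's loop is find?-with-default
theorem aLoop_eq (oligo1 oligo2 : String) (n : Int) (l : List Int) :
    aLoop oligo1 oligo2 n l =
      some ((l.find? (fun i =>
        PySem.Str.slice oligo1 (some i) (some n) == PySem.Str.slice oligo2 (some 0) (some (n - i)))).getD n) := by
  induction l with
  | nil => rfl
  | cons a l ih =>
    by_cases h : (PySem.Str.slice oligo1 (some a) (some n) == PySem.Str.slice oligo2 (some 0) (some (n - a))) = true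
    · simp [aLoop, List.find?_cons, h]
    · rw [Bool.not_eq_true] at h
      simp [aLoop, h, ih]

-- dropping i from l1 equals taking n - i from l2 iff the shifted characters agree pointwise
theorem drop_eq_take_iff (l1 l2 : List Char) (n i : Nat) (h1 : l1.length = n) (h2 : l2.length = n) (hi : i ≤ n) :
    (l1.drop i = l2.take (n - i)) ↔ (∀ t, i ≤ t → t < n → l1[t]? = l2[t - i]?) := by
  constructor
  · intro h t ht1 ht2
    have e1 : l1[t]? = (l1.drop i)[t - i]? := by
      rw [List.getElem?_drop]
      congr 1; omega
    rw [e1, h, List.getElem?_take_of_lt (by omega)]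
  · intro h
    apply List.ext_getElem?
    intro k
    rcases Nat.lt_or_ge k (n - i) with hk | hk
    · rw [List.getElem?_drop, List.getElem?_take_of_lt hk]
      have := h (i + k) (by omega) (by omega)
      simpa [Nat.add_sub_cancel_left] using this
    · rw [List.getElem?_eq_none (by simp [h1]; omega),
         List.getElem?_eq_none (by simp [List.length_take]; omega)]

-- A's slice test equals chGood on in-range shifts
theorem slice_test_eq_chGood (oligo1 oligo2 : String) (n i : Nat)
    (h1 : oligo1.toList.length = n) (h2 : oligo2.toList.length = n) (hi : i ≤ n) :
    (PySem.Str.slice oligo1 (some (i : Int)) (some (n : Int)) ==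
      PySem.Str.slice oligo2 (some 0) (some ((n : Int) - (i : Int))))
      = chGood oligo1.toList oligo2.toList i n := by
  have hsub : ((n : Int) - (i : Int)) = (((n - i : Nat)) : Int) := by push_cast [hi]; ring
  rw [Bool.eq_iff_iff]
  simp only [chGood, beq_iff_eq, decide_eq_true_eq]
  rw [← String.toList_inj]
  simp only [PySem.Str.toList_slice, PySem.Chars.slice_eq_listSlice, hsub]
  rw [PySem.List.slice_natCast]
  rw [show (some (0:Int)) = some (((0:Nat)) : Int) from rfl]
  rw [PySem.List.slice_natCast]
  simp only [Nat.sub_zero, List.drop_zero]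
  have hdt : (oligo1.toList.drop i).take (n - i) = oligo1.toList.drop i := by
    apply List.take_of_length_le
    simp [h1]
  rw [hdt]
  exact drop_eq_take_iff _ _ n i h1 h2 hi

-- pyRange over nat bounds as a mapped nat range
theorem pyRange_one_nat (n : Nat) :
    PySem.List.pyRange 1 (n : Int) 1 = (List.range' 1 (n - 1)).map (fun i : Nat => (i : Int)) := by
  rw [PySem.List.pyRange_one, List.range'_eq_map_range, List.map_map]
  have : ((n : Int) - 1).toNat = n - 1 := by omega
  rw [this]
  apply List.map_congr_left
  intro k _
  simp

-- ===== VERDICT (by name: the statement is the Claim_ definition above) =====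
theorem customDistance_spec : Claim_equal_customDistance := by
  intro oligo1 oligo2 _
  unfold Spec_customDistance customDistance customDistance_alt
  simp only []
  by_cases hlen : PySem.Str.len oligo1 ≠ PySem.Str.len oligo2
  · rw [if_pos hlen, if_pos hlen]
  · rw [if_neg hlen, if_neg hlen]
    rw [not_not] at hlen
    set N : Nat := oligo1.toList.length with hN
    have hlen1 : PySem.Str.len oligo1 = (N : Int) := by simp [PySem.Str.len, hN]
    have hlen2' : oligo2.toList.length = N := by
      have h := hlen
      simp only [PySem.Str.len] at h
      exact_mod_cast h.symm
    rw [hlen1]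
    -- A side
    rw [pyRange_one_nat, aLoop_eq, List.find?_map]
    have hfind : List.find?
        ((fun i : Int => PySem.Str.slice oligo1 (some i) (some (N:Int)) ==
          PySem.Str.slice oligo2 (some 0) (some ((N:Int) - i))) ∘ (fun i : Nat => (i : Int)))
        (List.range' 1 (N - 1))
        = List.find? (fun i : Nat => chGood oligo1.toList oligo2.toList i N) (List.range' 1 (N - 1)) := by
      apply find?_congr'
      intro i hi
      have hmem := List.mem_range'_1.mp hi
      exact slice_test_eq_chGood oligo1 oligo2 N i rfl hlen2' (by omega)
    rw [hfind]
    -- B side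
    rw [bInv oligo1 oligo2 N]
    rw [← List.head?_filter]
    cases (List.filter (fun i => chGood oligo1.toList oligo2.toList i N) (List.range' 1 (N - 1))) with
    | nil => simp
    | cons a l => simp
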